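-- pv_equiv track=rewrite | github.com/tskillian/Programming-Challenges | ordered vowels.py | is_ordered_word
-- ===== SOURCE A (Python) =====
-- def is_ordered_word(word):
--     vowels = list('aeiou')
--     spot = -1
--     for letter in word:
--         if letter in vowels:
--             if vowels.index(letter) >= spot:
--                 spot = vowels.index(letter)
--             else:
--                 return False
--     return True
-- ===== SOURCE B (Python) =====
-- def is_ordered_word(word):
--     v = [c for c in word if c in 'aeiou']
--     return v == sorted(v)
-- ===== Notes on version B (the rewrite author's own statement) =====
-- stated objective: simpler
-- what changed: Replaces the running-maximum vowel-index accumulator with an early return by a filter of the vowels followed by a sort-and-compare (v == sorted(v)).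
import Mathlib
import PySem

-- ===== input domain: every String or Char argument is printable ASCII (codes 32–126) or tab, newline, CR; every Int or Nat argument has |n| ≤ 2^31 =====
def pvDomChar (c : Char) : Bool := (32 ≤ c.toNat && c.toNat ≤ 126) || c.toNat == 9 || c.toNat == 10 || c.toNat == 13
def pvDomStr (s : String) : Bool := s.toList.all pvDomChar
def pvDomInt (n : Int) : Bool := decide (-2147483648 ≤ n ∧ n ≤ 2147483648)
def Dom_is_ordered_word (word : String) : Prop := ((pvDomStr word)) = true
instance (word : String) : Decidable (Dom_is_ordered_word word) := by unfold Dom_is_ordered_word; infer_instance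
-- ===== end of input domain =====

-- B replaces A's running-maximum vowel-index scan with filter-then-sort-and-compare; objective: simpler.

-- ===== PORT A =====
-- A's loop: spot is the running max vowel index (Int, starts at -1); early return False
def pvVowels : List Char := ['a', 'e', 'i', 'o', 'u']

def isOrderedLoop : List Char → Int → Bool
  | [], _ => true
  | letter :: rest, spot =>
    if letter ∈ pvVowels then
      match PySem.List.index? pvVowels letter with
      | some i => if (i : Int) ≥ spot then isOrderedLoop rest (i : Int) else false
      | none => false   -- unreachable: letter ∈ pvVowels
    else isOrderedLoop rest spot

def is_ordered_word (word : String) : Bool :=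
  isOrderedLoop word.toList (-1)

-- ===== PORT B =====
def is_ordered_word_alt (word : String) : Bool :=
  let v := word.toList.filter (fun c => c ∈ "aeiou".toList)
  v == PySem.List.sorted v (fun x => x) false

-- ===== PRECONDITION & SPEC =====
def Spec_is_ordered_word (word : String) (out : Bool) : Prop := out = is_ordered_word_alt word
instance (word : String) (out : Bool) : Decidable (Spec_is_ordered_word word out) := by unfold Spec_is_ordered_word; infer_instance

-- ===== CLAIM (what is proved, stated in full; the proofs are below) =====
def Claim_equal_is_ordered_word : Prop := ∀ (word : String), Dom_is_ordered_word word → Spec_is_ordered_word word (is_ordered_word word)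

-- ===== LEMMAS AND PROOFS =====

def pvIdx (c : Char) : Int := ((PySem.List.index? pvVowels c).getD 0 : Nat)

theorem pvIdx_le_iff {a b : Char} (ha : a ∈ pvVowels) (hb : b ∈ pvVowels) :
    pvIdx a ≤ pvIdx b ↔ a ≤ b := by
  fin_cases ha <;> fin_cases hb <;> decide

theorem isOrderedLoop_eq (l : List Char) (spot : Int) :
    isOrderedLoop l spot =
      decide ((spot :: (l.filter (fun c => c ∈ pvVowels)).map pvIdx).Pairwise (· ≤ ·)) := by
  induction l generalizing spot with
  | nil => simp [isOrderedLoop]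
  | cons c rest ih =>
    by_cases hv : c ∈ pvVowels
    · have hidx : ∃ i : Nat, PySem.List.index? pvVowels c = some i := by
        fin_cases hv <;> exact ⟨_, rfl⟩
      obtain ⟨i, hi⟩ := hidx
      have hpv : pvIdx c = (i : Int) := by
        simp only [pvIdx, hi, Option.getD_some]
      have hfc : List.filter (fun c => decide (c ∈ pvVowels)) (c :: rest)
          = c :: List.filter (fun c => decide (c ∈ pvVowels)) rest := by
        simp [hv]
      simp only [isOrderedLoop, if_pos hv, hi]
      rw [hfc, List.map_cons, hpv]
      by_cases hge : (i : Int) ≥ spot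
      · rw [if_pos hge, ih]
        simp only [decide_eq_decide]
        rw [List.pairwise_cons (a := spot)]
        constructor
        · intro hP
          refine ⟨?_, hP⟩
          intro a ha
          rcases List.mem_cons.mp ha with h1 | h2
          · omega
          · exact le_trans hge (List.rel_of_pairwise_cons hP h2)
        · exact And.right
      · rw [if_neg hge]
        symm
        simp only [decide_eq_false_iff_not]
        intro hP
        exact hge (List.rel_of_pairwise_cons hP List.mem_cons_self)
    · have hfc : List.filter (fun c => decide (c ∈ pvVowels)) (c :: rest)
          = List.filter (fun c => decide (c ∈ pvVowels)) rest := by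
        simp [hv]
      simp only [isOrderedLoop, if_neg hv]
      rw [hfc]
      exact ih spot

theorem filter_mem_vowels (l : List Char) :
    ∀ c ∈ l.filter (fun c => c ∈ pvVowels), c ∈ pvVowels := by
  intro c hc
  simp only [List.mem_filter] at hc
  exact of_decide_eq_true hc.2

theorem pairwise_neg_one_cons (xs : List Int) (h : ∀ x ∈ xs, 0 ≤ x) :
    ((-1 : Int) :: xs).Pairwise (· ≤ ·) ↔ xs.Pairwise (· ≤ ·) := by
  rw [List.pairwise_cons]
  constructor
  · exact And.right
  · intro h'
    exact ⟨fun x hx => by have := h x hx; omega, h'⟩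

theorem alt_eq_pairwise (v : List Char) :
    (v == PySem.List.sorted v (fun x => x) false) = decide (v.Pairwise (· ≤ ·)) := by
  by_cases hp : v.Pairwise (· ≤ ·)
  · rw [PySem.List.sorted_eq_self_of_pairwise _ _ hp]
    simp [hp]
  · simp only [decide_eq_false hp, beq_eq_false_iff_ne, ne_eq]
    intro he
    exact hp (by rw [he]; exact PySem.List.sorted_pairwise v (fun x => x))

-- ===== VERDICT (by name: the statement is the Claim_ definition above) =====
theorem is_ordered_word_spec : Claim_equal_is_ordered_word := by
  intro word _
  unfold Spec_is_ordered_word is_ordered_word is_ordered_word_alt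
  have hlist : "aeiou".toList = pvVowels := by decide
  simp only [hlist]
  rw [isOrderedLoop_eq, alt_eq_pairwise, decide_eq_decide]
  rw [pairwise_neg_one_cons _ (by
    intro x hx
    obtain ⟨c, hc, rfl⟩ := List.mem_map.mp hx
    simp [pvIdx])]
  rw [List.pairwise_map]
  constructor
  · intro h
    exact h.imp_of_mem (fun {a b} ha hb hab =>
      (pvIdx_le_iff (filter_mem_vowels _ _ ha) (filter_mem_vowels _ _ hb)).mp hab)
  · intro h
    exact h.imp_of_mem (fun {a b} ha hb hab =>
      (pvIdx_le_iff (filter_mem_vowels _ _ ha) (filter_mem_vowels _ _ hb)).mpr hab)
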